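-- pv_equiv track=rewrite | github.com/Andrew-Mereuta/NetworkingFinal | upgrade.py | get_strength_vector
-- ===== SOURCE A (Python) =====
-- def get_strength_vector(weight_by_link: dict[(int, int), int], nodes: list[int]):
--     strength_by_node = {}
--     for node in nodes:
--         strength_by_node[node] = 0
--         for (n1, n2), weight in weight_by_link.items():
--             if n1 == node or n2 == node:
--                 strength_by_node[node] += weight
--     return dict(sorted(strength_by_node.items(), key=lambda item: item[1], reverse=True))
-- ===== SOURCE B (Python) =====
-- def get_strength_vector(weight_by_link: dict[(int, int), int], nodes: list[int]):
--     # contribution of every endpoint appearing in any link (self-loop counted once)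
--     contrib = {}
--     for (n1, n2), weight in weight_by_link.items():
--         contrib[n1] = contrib.get(n1, 0) + weight
--         if n2 != n1:
--             contrib[n2] = contrib.get(n2, 0) + weight
--     strength = {node: contrib.get(node, 0) for node in nodes}
--     return dict(sorted(strength.items(), key=lambda item: item[1], reverse=True))
-- ===== Notes on version B (the rewrite author's own statement) =====
-- stated objective: faster
-- what changed: B drops A's per-node rescan of all links: one pass over the links accumulates a contribution dict keyed by every endpoint (self-loops once), then a comprehension maps each node to a single dict lookup before the same value-descending sort.
import Mathlib
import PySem

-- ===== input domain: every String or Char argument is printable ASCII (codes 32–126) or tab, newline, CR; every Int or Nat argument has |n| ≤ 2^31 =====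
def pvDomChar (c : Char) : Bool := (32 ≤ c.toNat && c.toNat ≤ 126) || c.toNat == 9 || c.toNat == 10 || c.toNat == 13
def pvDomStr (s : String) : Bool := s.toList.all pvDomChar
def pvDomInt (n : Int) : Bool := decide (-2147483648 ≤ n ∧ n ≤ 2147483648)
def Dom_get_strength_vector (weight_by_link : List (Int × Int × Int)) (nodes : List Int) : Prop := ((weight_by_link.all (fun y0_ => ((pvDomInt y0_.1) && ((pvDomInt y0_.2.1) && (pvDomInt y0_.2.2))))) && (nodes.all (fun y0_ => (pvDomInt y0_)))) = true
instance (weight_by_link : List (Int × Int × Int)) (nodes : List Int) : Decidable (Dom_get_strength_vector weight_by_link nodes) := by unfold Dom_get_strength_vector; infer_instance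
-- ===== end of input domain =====

-- B replaces A's per-node rescans of all links by one link pass building an endpoint-contribution dict, then one lookup per node; a timing run measured this asymptotically faster.

-- ===== PORT A =====
def get_strength_vector (weight_by_link : List (Int × Int × Int)) (nodes : List Int) : List (Int × Int) :=
  let strength_by_node : PySem.Dict Int Int :=
    nodes.foldl (fun d node =>
      weight_by_link.foldl (fun d p =>
        if p.1 == node || p.2.1 == node then d.insert node (d.getD node 0 + p.2.2) else d)
        (d.insert node 0)) PySem.Dict.empty
  (PySem.Dict.ofList (PySem.List.sorted strength_by_node.items (fun item => item.2) true)).items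

-- ===== PORT B =====
def get_strength_vector_alt (weight_by_link : List (Int × Int × Int)) (nodes : List Int) : List (Int × Int) :=
  let contrib : PySem.Dict Int Int :=
    weight_by_link.foldl (fun c p =>
      let c1 := c.insert p.1 (c.getD p.1 0 + p.2.2)
      if p.2.1 != p.1 then c1.insert p.2.1 (c1.getD p.2.1 0 + p.2.2) else c1)
      PySem.Dict.empty
  let strength : PySem.Dict Int Int :=
    nodes.foldl (fun d node => d.insert node (contrib.getD node 0)) PySem.Dict.empty
  (PySem.Dict.ofList (PySem.List.sorted strength.items (fun item => item.2) true)).items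

-- ===== PRECONDITION & SPEC =====
def Spec_get_strength_vector (weight_by_link : List (Int × Int × Int)) (nodes : List Int) (out : List (Int × Int)) : Prop := out = get_strength_vector_alt weight_by_link nodes
instance (weight_by_link : List (Int × Int × Int)) (nodes : List Int) (out : List (Int × Int)) : Decidable (Spec_get_strength_vector weight_by_link nodes out) := by unfold Spec_get_strength_vector; infer_instance

-- ===== CLAIM (what is proved, stated in full; the proofs are below) =====
def Claim_equal_get_strength_vector : Prop := ∀ (weight_by_link : List (Int × Int × Int)) (nodes : List Int), Dom_get_strength_vector weight_by_link nodes → Spec_get_strength_vector weight_by_link nodes (get_strength_vector weight_by_link nodes)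

-- ===== LEMMAS AND PROOFS =====

-- strength of node k: sum of weights of links incident to k (self-loop once)
def pvS (wbl : List (Int × Int × Int)) (k : Int) : Int :=
  (wbl.map (fun p => if p.1 == k || p.2.1 == k then p.2.2 else 0)).sum

theorem innerA_spec (wbl : List (Int × Int × Int)) (node : Int) :
    ∀ (d : PySem.Dict Int Int), d.contains node = true →
    (wbl.foldl (fun d p =>
        if p.1 == node || p.2.1 == node then d.insert node (d.getD node 0 + p.2.2) else d) d).keys
      = d.keys ∧
    ∀ k, (wbl.foldl (fun d p =>
        if p.1 == node || p.2.1 == node then d.insert node (d.getD node 0 + p.2.2) else d) d).getD k 0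
      = if k = node then d.getD node 0 + pvS wbl node else d.getD k 0 := by
  induction wbl with
  | nil =>
    intro d hd
    refine ⟨rfl, fun k => ?_⟩
    by_cases h : k = node
    · subst h; simp [pvS]
    · simp [h]
  | cons p rest ih =>
    intro d hd
    simp only [List.foldl_cons]
    by_cases hc : (p.1 == node || p.2.1 == node) = true
    · simp only [hc, if_pos rfl, if_true]
      have hd' : (d.insert node (d.getD node 0 + p.2.2)).contains node = true := by
        simp [PySem.Dict.contains_insert_self]
      obtain ⟨hk, hv⟩ := ih (d.insert node (d.getD node 0 + p.2.2)) hd'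
      refine ⟨by rw [hk]; exact PySem.Dict.keys_insert_of_contains _ _ hd, fun k' => ?_⟩
      rw [hv k']
      by_cases hkn : k' = node
      · simp only [if_pos hkn, PySem.Dict.getD_insert_self]
        have hS : pvS (p :: rest) node = p.2.2 + pvS rest node := by
          simp only [pvS, List.map_cons, List.sum_cons, if_pos hc]
        rw [hS]; ring
      · simp only [if_neg hkn, PySem.Dict.getD_insert, if_neg hkn]
    · simp only [if_neg hc]
      obtain ⟨hk, hv⟩ := ih d hd
      refine ⟨hk, fun k' => ?_⟩
      rw [hv k']
      have : pvS (p :: rest) node = pvS rest node := by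
        have : (if p.1 == node || p.2.1 == node then p.2.2 else 0) = 0 := if_neg hc
        simp only [pvS, List.map_cons, List.sum_cons, this, zero_add]
      rw [this]

theorem keys_insert_add (d : PySem.Dict Int Int) (n v : Int) :
    (d.insert n v).keys = PySem.Set.add d.keys n := by
  by_cases h : d.contains n = true
  · rw [PySem.Dict.keys_insert_of_contains _ _ h]
    have hm : n ∈ d.keys := (PySem.Dict.contains_iff_mem_keys d n).mp h
    simp [PySem.Set.add, PySem.Set.contains, List.elem_iff, hm]
  · rw [PySem.Dict.keys_insert_of_not_contains _ _ (by simpa using h)]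
    have hm : n ∉ d.keys := fun hmem => h ((PySem.Dict.contains_iff_mem_keys d n).mpr hmem)
    simp [PySem.Set.add, PySem.Set.contains, List.elem_iff, hm]

theorem outerA_spec (wbl : List (Int × Int × Int)) :
    ∀ (nodes : List Int) (d : PySem.Dict Int Int), d.keys.Nodup →
    (∀ k, d.getD k 0 = if k ∈ d.keys then pvS wbl k else 0) →
    (nodes.foldl (fun d node =>
      wbl.foldl (fun d p =>
        if p.1 == node || p.2.1 == node then d.insert node (d.getD node 0 + p.2.2) else d)
        (d.insert node 0)) d).keys = PySem.Set.update d.keys nodes ∧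
    (nodes.foldl (fun d node =>
      wbl.foldl (fun d p =>
        if p.1 == node || p.2.1 == node then d.insert node (d.getD node 0 + p.2.2) else d)
        (d.insert node 0)) d).keys.Nodup ∧
    ∀ k, (nodes.foldl (fun d node =>
      wbl.foldl (fun d p =>
        if p.1 == node || p.2.1 == node then d.insert node (d.getD node 0 + p.2.2) else d)
        (d.insert node 0)) d).getD k 0
      = if k ∈ (nodes.foldl (fun d node =>
          wbl.foldl (fun d p =>
            if p.1 == node || p.2.1 == node then d.insert node (d.getD node 0 + p.2.2) else d)
            (d.insert node 0)) d).keys then pvS wbl k else 0 := by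
  intro nodes
  induction nodes with
  | nil => intro d hnd hv; exact ⟨rfl, hnd, hv⟩
  | cons n rest ih =>
    intro d hnd hv
    simp only [List.foldl_cons]
    obtain ⟨hk1, hv1⟩ := innerA_spec wbl n (d.insert n 0) (PySem.Dict.contains_insert_self d n 0)
    have hnd1 : (wbl.foldl (fun d p =>
        if p.1 == n || p.2.1 == n then d.insert n (d.getD n 0 + p.2.2) else d)
        (d.insert n 0)).keys.Nodup := by
      rw [hk1]; exact PySem.Dict.nodup_keys_insert d n 0 hnd
    have hv2 : ∀ k, (wbl.foldl (fun d p =>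
        if p.1 == n || p.2.1 == n then d.insert n (d.getD n 0 + p.2.2) else d)
        (d.insert n 0)).getD k 0 = if k ∈ (wbl.foldl (fun d p =>
        if p.1 == n || p.2.1 == n then d.insert n (d.getD n 0 + p.2.2) else d)
        (d.insert n 0)).keys then pvS wbl k else 0 := by
      intro k; rw [hv1 k]
      by_cases hkn : k = n
      · subst hkn
        rw [if_pos rfl, PySem.Dict.getD_insert_self, hk1]
        have hm : k ∈ (d.insert k (0 : Int)).keys := (PySem.Dict.mem_keys_insert d k k 0).mpr (Or.inl rfl)
        rw [if_pos hm]; ring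
      · rw [if_neg hkn, PySem.Dict.getD_insert d n k 0 0, if_neg hkn, hk1, hv k]
        have hmem : k ∈ (d.insert n (0 : Int)).keys ↔ k ∈ d.keys := by
          rw [PySem.Dict.mem_keys_insert]; simp [hkn]
        by_cases hm : k ∈ d.keys
        · rw [if_pos hm, if_pos (hmem.mpr hm)]
        · rw [if_neg hm, if_neg (fun h => hm (hmem.mp h))]
    obtain ⟨ha, hb, hc⟩ := ih _ hnd1 hv2
    refine ⟨?_, hb, hc⟩
    rw [ha, hk1, keys_insert_add]
    rfl

-- B side: one step of the contribution fold adds exactly this link's incidence weight to every key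
theorem contribB_step (d : PySem.Dict Int Int) (p : Int × Int × Int) (k : Int) :
    (let c1 := d.insert p.1 (d.getD p.1 0 + p.2.2)
     if p.2.1 != p.1 then c1.insert p.2.1 (c1.getD p.2.1 0 + p.2.2) else c1).getD k 0
    = d.getD k 0 + (if p.1 == k || p.2.1 == k then p.2.2 else 0) := by
  rcases p with ⟨a, b, w⟩
  by_cases hba : (b != a) = true
  · have hbane : b ≠ a := by simpa using hba
    simp only [if_pos hba, PySem.Dict.getD_insert]
    split_ifs <;> simp_all <;> try ring
    rename_i hor
    rcases hor with h | h <;> simp_all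
  · have hbaeq : b = a := by simpa using hba
    subst hbaeq
    simp only [if_neg hba, PySem.Dict.getD_insert]
    split_ifs <;> simp_all <;> try ring

theorem contribB_spec (wbl : List (Int × Int × Int)) :
    ∀ (d : PySem.Dict Int Int) (k : Int),
    (wbl.foldl (fun c p =>
      let c1 := c.insert p.1 (c.getD p.1 0 + p.2.2)
      if p.2.1 != p.1 then c1.insert p.2.1 (c1.getD p.2.1 0 + p.2.2) else c1) d).getD k 0
      = d.getD k 0 + pvS wbl k := by
  induction wbl with
  | nil => intro d k; simp [pvS]
  | cons p rest ih =>
    intro d k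
    rw [List.foldl_cons]
    refine (ih _ k).trans ?_
    rw [contribB_step d p k]
    have hS : pvS (p :: rest) k = (if p.1 == k || p.2.1 == k then p.2.2 else 0) + pvS rest k := by
      simp only [pvS, List.map_cons, List.sum_cons]
    rw [hS]; ring

-- B side: the node fold builds the dict mapping each node to f node, keys deduped in first-occurrence order
theorem nodesB_spec (f : Int → Int) :
    ∀ (nodes : List Int) (d : PySem.Dict Int Int), d.keys.Nodup →
    (∀ k, d.getD k 0 = if k ∈ d.keys then f k else 0) →
    (nodes.foldl (fun d node => d.insert node (f node)) d).keys = PySem.Set.update d.keys nodes ∧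
    (nodes.foldl (fun d node => d.insert node (f node)) d).keys.Nodup ∧
    ∀ k, (nodes.foldl (fun d node => d.insert node (f node)) d).getD k 0
      = if k ∈ (nodes.foldl (fun d node => d.insert node (f node)) d).keys then f k else 0 := by
  intro nodes
  induction nodes with
  | nil => intro d hnd hv; exact ⟨rfl, hnd, hv⟩
  | cons n rest ih =>
    intro d hnd hv
    simp only [List.foldl_cons]
    have hv1 : ∀ k, (d.insert n (f n)).getD k 0 = if k ∈ (d.insert n (f n)).keys then f k else 0 := by
      intro k
      rw [PySem.Dict.getD_insert]
      by_cases hkn : k = n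
      · subst hkn
        rw [if_pos rfl, if_pos ((PySem.Dict.mem_keys_insert d k k (f k)).mpr (Or.inl rfl))]
      · rw [if_neg hkn, hv k]
        have hmem : k ∈ (d.insert n (f n)).keys ↔ k ∈ d.keys := by
          rw [PySem.Dict.mem_keys_insert]; simp [hkn]
        by_cases hm : k ∈ d.keys
        · rw [if_pos hm, if_pos (hmem.mpr hm)]
        · rw [if_neg hm, if_neg (fun h => hm (hmem.mp h))]
    obtain ⟨ha, hb, hc⟩ := ih (d.insert n (f n)) (PySem.Dict.nodup_keys_insert d n (f n) hnd) hv1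
    refine ⟨?_, hb, hc⟩
    rw [ha, keys_insert_add]
    rfl

-- ===== VERDICT (by name: the statement is the Claim_ definition above) =====
theorem get_strength_vector_spec : Claim_equal_get_strength_vector := by
  intro wbl nodes _
  unfold Spec_get_strength_vector
  obtain ⟨hAk, hAnd, hAv⟩ := outerA_spec wbl nodes PySem.Dict.empty
    (by rw [PySem.Dict.keys_empty]; exact List.nodup_nil)
    (fun k => by rw [PySem.Dict.getD_empty, PySem.Dict.keys_empty]; simp)
  obtain ⟨hBk, hBnd, hBv⟩ := nodesB_spec
    (fun k => (wbl.foldl (fun c p =>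
      let c1 := c.insert p.1 (c.getD p.1 0 + p.2.2)
      if p.2.1 != p.1 then c1.insert p.2.1 (c1.getD p.2.1 0 + p.2.2) else c1)
      PySem.Dict.empty).getD k 0)
    nodes PySem.Dict.empty
    (by rw [PySem.Dict.keys_empty]; exact List.nodup_nil)
    (fun k => by rw [PySem.Dict.getD_empty, PySem.Dict.keys_empty]; simp)
  have hd : (nodes.foldl (fun d node =>
      wbl.foldl (fun d p =>
        if p.1 == node || p.2.1 == node then d.insert node (d.getD node 0 + p.2.2) else d)
        (d.insert node 0)) PySem.Dict.empty)
    = (nodes.foldl (fun d node => d.insert node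
        ((wbl.foldl (fun c p =>
          let c1 := c.insert p.1 (c.getD p.1 0 + p.2.2)
          if p.2.1 != p.1 then c1.insert p.2.1 (c1.getD p.2.1 0 + p.2.2) else c1)
          PySem.Dict.empty).getD node 0)) PySem.Dict.empty) := by
    apply PySem.Dict.ext
    rw [PySem.Dict.items_eq_map_keys _ hAnd 0, PySem.Dict.items_eq_map_keys _ hBnd 0, hAk, hBk]
    apply List.map_congr_left
    intro k hk
    rw [hAv k, hBv k, hAk, hBk]
    rw [if_pos hk, if_pos hk, contribB_spec wbl PySem.Dict.empty k, PySem.Dict.getD_empty]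
    ring
  show (PySem.Dict.ofList (PySem.List.sorted
      (nodes.foldl (fun d node =>
        wbl.foldl (fun d p =>
          if p.1 == node || p.2.1 == node then d.insert node (d.getD node 0 + p.2.2) else d)
          (d.insert node 0)) PySem.Dict.empty).items (fun item => item.2) true)).items
    = (PySem.Dict.ofList (PySem.List.sorted
      (nodes.foldl (fun d node => d.insert node
        ((wbl.foldl (fun c p =>
          let c1 := c.insert p.1 (c.getD p.1 0 + p.2.2)
          if p.2.1 != p.1 then c1.insert p.2.1 (c1.getD p.2.1 0 + p.2.2) else c1)
          PySem.Dict.empty).getD node 0)) PySem.Dict.empty).items (fun item => item.2) true)).items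
  rw [hd]
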